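-- pv_equiv track=rewrite | github.com/RaykelJosue/hack_python_2 | hack_1.py | fn_hack_1
-- ===== SOURCE A (Python) =====
-- def fn_hack_1(s):
--     result = s
--     transformed_list = []
--
--     segments = [result[i:i+3] for i in range(0, len(result), 3)]
--
--     for segment in segments:
--         if len(segment) == 3:
--             new_segment = f"{segment[0]}{segment[1].upper()}{segment[2]}"
--             transformed_list.append(new_segment)
--         else:
--             transformed_list.append(segment)
--
--     final_result = "".join(transformed_list)
--     return final_result
-- ===== SOURCE B (Python) =====
-- def fn_hack_1(s):
--     n = len(s)
--     return "".join(c.upper() if i % 3 == 1 and i + 1 < n else c for i, c in enumerate(s))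
-- ===== Notes on version B (the rewrite author's own statement) =====
-- stated objective: simpler
-- what changed: B drops A's segment-slicing/list-building pipeline (slice into 3-char substrings, rebuild each full segment with an f-string, append to a list, join) for a single flat enumerate pass that uppercases exactly the characters at index 1 mod 3 whose segment is complete (i+1 < len(s)).
import Mathlib
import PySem

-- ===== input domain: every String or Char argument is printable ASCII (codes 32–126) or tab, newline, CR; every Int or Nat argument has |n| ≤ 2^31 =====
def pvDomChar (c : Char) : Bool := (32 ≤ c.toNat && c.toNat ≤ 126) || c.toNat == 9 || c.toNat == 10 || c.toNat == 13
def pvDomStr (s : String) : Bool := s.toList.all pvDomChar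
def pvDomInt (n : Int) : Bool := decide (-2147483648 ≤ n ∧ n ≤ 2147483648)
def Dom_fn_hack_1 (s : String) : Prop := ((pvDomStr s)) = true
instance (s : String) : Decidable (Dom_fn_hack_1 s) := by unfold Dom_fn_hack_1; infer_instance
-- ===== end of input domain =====

-- B replaces A's slice-into-3-char-segments / rebuild / append / join pipeline by one flat
-- enumerate pass uppercasing the characters at index ≡ 1 (mod 3) of complete segments (simpler).

-- ===== PORT A =====
-- segments = [result[i:i+3] for i in range(0, len(result), 3)]
def pvSegsA (result : List Char) : List (List Char) :=
  (PySem.List.pyRange 0 result.length 3).map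
    (fun i => PySem.List.slice result (some i) (some (i + 3)))

-- loop body: f"{seg[0]}{seg[1].upper()}{seg[2]}" for a full segment, the segment itself otherwise
def pvSegXform (seg : List Char) : List Char :=
  match seg with
  | [a, b, c] => [a] ++ PySem.Chars.upper [b] ++ [c]
  | _ => seg

-- the for-loop building transformed_list by append
def pvLoopA (segments : List (List Char)) : List (List Char) :=
  segments.foldl (fun acc seg => acc ++ [pvSegXform seg]) []

def fn_hack_1 (s : String) : String :=
  String.mk (PySem.Chars.join [] (pvLoopA (pvSegsA s.toList)))

-- ===== PORT B =====
def fn_hack_1_alt (s : String) : String :=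
  let n : Int := (s.toList.length : Int)
  String.mk (PySem.Chars.join []
    ((PySem.List.enumerate s.toList).map
      (fun p => if PySem.Int.mod p.1 3 = 1 ∧ p.1 + 1 < n then PySem.Chars.upper [p.2] else [p.2])))

-- ===== PRECONDITION & SPEC =====
def Spec_fn_hack_1 (s : String) (out : String) : Prop := out = fn_hack_1_alt s
instance (s : String) (out : String) : Decidable (Spec_fn_hack_1 s out) := by unfold Spec_fn_hack_1; infer_instance

-- ===== CLAIM (what is proved, stated in full; the proofs are below) =====
def Claim_equal_fn_hack_1 : Prop := ∀ (s : String), Dom_fn_hack_1 s → Spec_fn_hack_1 s (fn_hack_1 s)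

-- ===== LEMMAS AND PROOFS =====

-- common recursive characterisation: uppercase the middle of every full 3-char block
def pvG : List Char → List Char
  | a :: b :: c :: rest => a :: PySem.Chars.upperChar b :: c :: pvG rest
  | cs => cs

theorem pv_join_nil_flatten (l : List (List Char)) :
    PySem.Chars.join [] l = l.flatten := by
  match l with
  | [] => simp [PySem.Chars.join_nil]
  | [p] => simp [PySem.Chars.join_singleton]
  | p :: q :: rest =>
      rw [PySem.Chars.join_cons_cons]
      simp [pv_join_nil_flatten (q :: rest)]

theorem pv_foldl_append_map {α β : Type} (f : α → β) (l : List α) (acc : List β) :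
    l.foldl (fun acc x => acc ++ [f x]) acc = acc ++ l.map f := by
  induction l generalizing acc with
  | nil => simp
  | cons x xs ih => simp [List.foldl_cons, ih]

theorem pv_loopA_eq_map (segments : List (List Char)) :
    pvLoopA segments = segments.map pvSegXform := by
  unfold pvLoopA
  exact pv_foldl_append_map pvSegXform segments []

-- range(0, n+3, 3) = 0 :: (range(0, n, 3) shifted by 3), for n >= 0
theorem pv_pyRange3_shift (n : Int) (hn : 0 <= n) :
    PySem.List.pyRange 0 (n + 3) 3 = 0 :: (PySem.List.pyRange 0 n 3).map (· + 3) := by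
  by_cases h2 : (0 : Int) < n
  · rw [PySem.List.pyRange_of_pos 0 (n + 3) (by norm_num),
        PySem.List.pyRange_of_pos 0 n (by norm_num)]
    rw [if_pos (by omega : (0:Int) < n + 3), if_pos h2]
    have hcount : ((n + 3 - 0 + 3 - 1) / 3).toNat = ((n - 0 + 3 - 1) / 3).toNat + 1 := by
      omega
    rw [hcount, List.range_succ_eq_map, List.map_cons, List.map_map, List.map_map]
    simp only [List.cons.injEq]
    refine ⟨by norm_num, ?_⟩
    apply List.map_congr_left
    intro k _
    simp only [Function.comp_apply]
    push_cast
    ring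
  · have hn0 : n = 0 := by omega
    subst hn0
    decide

def pvFA (cs : List Char) : List Char := (pvLoopA (pvSegsA cs)).flatten

theorem pv_drop_add3 {α : Type} (a b c : α) (rest : List α) (m : Nat) :
    List.drop (m + 3) (a :: b :: c :: rest) = List.drop m rest := by
  rw [show m + 3 = m + 1 + 1 + 1 from rfl]
  simp [List.drop_succ_cons]

theorem pv_segsA_step (a b c : Char) (rest : List Char) :
    pvSegsA (a :: b :: c :: rest) = [a, b, c] :: pvSegsA rest := by
  unfold pvSegsA
  have hlen : (((a :: b :: c :: rest).length : Nat) : Int) = (rest.length : Int) + 3 := by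
    simp; omega
  rw [hlen, pv_pyRange3_shift _ (by positivity), List.map_cons, List.map_map]
  simp only [List.cons.injEq]
  refine ⟨?_, ?_⟩
  · rw [PySem.List.slice_toNat _ (by norm_num) (by norm_num)]
    simp
  · apply List.map_congr_left
    intro i hi
    have hnn : 0 <= i := ((PySem.List.mem_pyRange_iff_of_pos (by norm_num) i).mp hi).1
    simp only [Function.comp_apply]
    rw [PySem.List.slice_toNat _ (by omega) (by omega),
        PySem.List.slice_toNat _ (by omega) (by omega)]
    have e1 : (i + 3).toNat = i.toNat + 3 := by omega
    have e2 : (i + 3 + 3).toNat = i.toNat + 3 + 3 := by omega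
    rw [e1, e2, pv_drop_add3]
    congr 1
    omega

theorem pv_fA_eq_pvG (cs : List Char) : pvFA cs = pvG cs := by
  induction cs using pvG.induct with
  | case1 a b c rest ih =>
      unfold pvFA
      rw [pv_segsA_step, pv_loopA_eq_map, List.map_cons, List.flatten_cons, ← pv_loopA_eq_map]
      have hrest : (pvLoopA (pvSegsA rest)).flatten = pvG rest := ih
      simp [hrest, pvG, pvSegXform, PySem.Chars.upper]
  | case2 cs h =>
      match cs, h with
      | [], _ => rfl
      | [a], _ =>
          unfold pvFA pvSegsA
          rw [show ((([a] : List Char).length : Nat) : Int) = 1 by simp,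
              show PySem.List.pyRange 0 1 3 = [0] by decide]
          simp only [List.map_cons, List.map_nil]
          rw [PySem.List.slice_toNat _ (by norm_num) (by norm_num)]
          simp [pvLoopA, pvSegXform, pvG]
      | [a, b], _ =>
          unfold pvFA pvSegsA
          rw [show ((([a, b] : List Char).length : Nat) : Int) = 2 by simp,
              show PySem.List.pyRange 0 2 3 = [0] by decide]
          simp only [List.map_cons, List.map_nil]
          rw [PySem.List.slice_toNat _ (by norm_num) (by norm_num)]
          simp [pvLoopA, pvSegXform, pvG]
      | a :: b :: c :: rest, h => exact (h a b c rest rfl).elim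

-- B-side: the enumerate map with start k (k = 0 mod 3, 0 <= k) over total length n = k + |cs|
theorem pv_fB_eq_pvG (cs : List Char) (k : Int) (hk0 : 0 <= k) (hk3 : PySem.Int.mod k 3 = 0) :
    ((PySem.List.enumerate cs k).map
      (fun p => if PySem.Int.mod p.1 3 = 1 ∧ p.1 + 1 < k + (cs.length : Int)
                then PySem.Chars.upper [p.2] else [p.2])).flatten = pvG cs := by
  induction cs using pvG.induct generalizing k with
  | case1 a b c rest ih =>
      rw [PySem.List.enumerate_cons, PySem.List.enumerate_cons, PySem.List.enumerate_cons]
      have hm0 : ¬ PySem.Int.mod k 3 = 1 := by rw [hk3]; norm_num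
      have hm1 : PySem.Int.mod (k + 1) 3 = 1 := by
        simp [PySem.Int.mod, Int.fmod_eq_emod] at hk3 ⊢; omega
      have hm2 : ¬ PySem.Int.mod (k + 1 + 1) 3 = 1 := by
        simp [PySem.Int.mod, Int.fmod_eq_emod] at hk3 ⊢; omega
      have hlt : k + 1 + 1 < k + (((a :: b :: c :: rest).length : Nat) : Int) := by
        simp; omega
      have hk3' : PySem.Int.mod (k + 1 + 1 + 1) 3 = 0 := by
        simp [PySem.Int.mod, Int.fmod_eq_emod] at hk3 ⊢; omega
      simp only [List.map_cons, List.flatten_cons]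
      rw [if_neg (fun hc => hm0 hc.1), if_pos ⟨hm1, hlt⟩, if_neg (fun hc => hm2 hc.1)]
      have heq : k + 1 + 1 + 1 + ((rest.length : Nat) : Int)
          = k + (((a :: b :: c :: rest).length : Nat) : Int) := by simp; omega
      have hrec := ih (k + 1 + 1 + 1) (by omega) hk3'
      rw [heq] at hrec
      rw [hrec]
      simp [pvG, PySem.Chars.upper]
  | case2 cs h =>
      match cs, h with
      | [], _ => simp [PySem.List.enumerate, pvG]
      | [a], _ =>
          rw [PySem.List.enumerate_cons]
          have hm0 : ¬ PySem.Int.mod k 3 = 1 := by rw [hk3]; norm_num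
          simp only [PySem.List.enumerate, List.map_cons, List.map_nil, List.flatten]
          rw [if_neg (fun hc => hm0 hc.1)]
          simp [pvG]
      | [a, b], _ =>
          rw [PySem.List.enumerate_cons, PySem.List.enumerate_cons]
          have hm0 : ¬ PySem.Int.mod k 3 = 1 := by rw [hk3]; norm_num
          have hge : ¬ (k + 1 + 1 < k + ((([a, b] : List Char).length : Nat) : Int)) := by
            have h2 : ((([a, b] : List Char).length : Nat) : Int) = 2 := by simp
            omega
          simp only [PySem.List.enumerate, List.map_cons, List.map_nil, List.flatten]
          rw [if_neg (fun hc => hm0 hc.1), if_neg (fun hc => hge hc.2)]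
          simp [pvG]
      | a :: b :: c :: rest, h => exact (h a b c rest rfl).elim

-- ===== VERDICT (by name: the statement is the Claim_ definition above) =====
theorem fn_hack_1_spec : Claim_equal_fn_hack_1 := by
  intro s _
  unfold Spec_fn_hack_1
  simp only [fn_hack_1, fn_hack_1_alt]
  rw [pv_join_nil_flatten, pv_join_nil_flatten]
  have hA : (pvLoopA (pvSegsA s.toList)).flatten = pvG s.toList := pv_fA_eq_pvG s.toList
  have hB := pv_fB_eq_pvG s.toList 0 (by norm_num) (by simp [PySem.Int.mod])
  simp only [zero_add] at hB
  rw [hA, ← hB]
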